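-- pv_equiv track=rewrite | github.com/jonbelanger/pyastrix | astro_annotator/annotation_renderer.py | _compose_group_label
-- ===== SOURCE A (Python) =====
-- def _compose_group_label(group):
--     """Compose a single label for a clustered group.
--
--     SIMBAD-sourced labels are ordered first. Duplicate labels are removed.
--     """
--     simbad_members = []
--     other_members = []
--     seen = set()
--     for m in group["members"]:
--         lbl = m.get("label", "")
--         if not lbl or lbl in seen:
--             continue
--         seen.add(lbl)
--         if m.get("source") and "simbad" in str(m.get("source")).lower():
--             simbad_members.append(lbl)
--         else:
--             other_members.append(lbl)
--
--     member_strings = simbad_members + other_members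
--     if not member_strings:
--         return None
--     return "; ".join(member_strings)
-- ===== SOURCE B (Python) =====
-- def _compose_group_label(group):
--     """Compose a single label for a clustered group.
--
--     One insertion-ordered dict records each first-seen non-empty label with
--     its is-simbad flag; a stable sort by that flag puts SIMBAD labels first.
--     """
--     seen = {}
--     for m in group["members"]:
--         lbl = m.get("label", "")
--         if lbl and lbl not in seen:
--             seen[lbl] = bool(m.get("source")) and "simbad" in str(m.get("source")).lower()
--     if not seen:
--         return None
--     return "; ".join(sorted(seen, key=lambda lbl: not seen[lbl]))
-- ===== Notes on version B (the rewrite author's own statement) =====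
-- stated objective: alternative
-- what changed: Replaces the two accumulator lists plus a separate seen-set with a single insertion-ordered dict mapping each first-seen label to its is-simbad flag, then obtains the SIMBAD-first order by a stable sort on that flag instead of list concatenation.
-- outside the precondition, e.g. on _compose_group_label({}): A raises KeyError, B raises KeyError
import Mathlib
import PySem

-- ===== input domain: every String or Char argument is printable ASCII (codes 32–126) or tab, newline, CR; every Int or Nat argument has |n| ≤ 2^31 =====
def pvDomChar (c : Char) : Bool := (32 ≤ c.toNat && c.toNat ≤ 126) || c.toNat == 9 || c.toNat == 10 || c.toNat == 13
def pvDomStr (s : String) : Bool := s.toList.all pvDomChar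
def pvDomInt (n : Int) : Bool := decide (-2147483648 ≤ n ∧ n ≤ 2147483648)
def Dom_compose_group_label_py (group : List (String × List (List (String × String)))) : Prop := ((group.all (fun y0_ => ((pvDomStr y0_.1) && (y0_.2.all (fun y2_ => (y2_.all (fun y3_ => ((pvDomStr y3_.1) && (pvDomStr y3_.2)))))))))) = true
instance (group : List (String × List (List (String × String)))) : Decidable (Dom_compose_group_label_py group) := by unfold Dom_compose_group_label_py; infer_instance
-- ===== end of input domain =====

-- One honest line: B keeps one insertion-ordered dict (label → is-simbad flag) and stable-sorts
-- its keys by that flag, instead of A's two accumulator lists plus a seen-set; same cost class.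

-- Shared truthiness test: `m.get("source") and "simbad" in str(m.get("source")).lower()`
-- (both Python versions contain this identical expression verbatim).
def pvSrcIsSimbad (m : List (String × String)) : Bool :=
  match PySem.Dict.get? ⟨m⟩ "source" with
  | none => false
  | some s => !(s == "") && PySem.Str.isIn "simbad" (PySem.Str.lower s)

-- ===== PORT A =====
def pvLoopA : List (List (String × String)) → List String → List String → PySem.Set String →
    List String × List String
  | [], sim, oth, _ => (sim, oth)
  | m :: rest, sim, oth, seen =>
    let lbl := PySem.Dict.getD ⟨m⟩ "label" ""
    if lbl == "" || PySem.Set.contains seen lbl then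
      pvLoopA rest sim oth seen
    else
      let seen' := PySem.Set.add seen lbl
      if pvSrcIsSimbad m then pvLoopA rest (sim ++ [lbl]) oth seen'
      else pvLoopA rest sim (oth ++ [lbl]) seen'

def compose_group_label_py (group : List (String × List (List (String × String)))) : Option String :=
  match PySem.Dict.get? ⟨group⟩ "members" with
  | none => none  -- Python raises KeyError here; excluded by Pre_
  | some ms =>
    let p := pvLoopA ms [] [] PySem.Set.empty
    let member_strings := p.1 ++ p.2
    if member_strings == [] then none
    else some (PySem.Str.join "; " member_strings)

-- ===== PORT B =====
def pvLoopB : List (List (String × String)) → PySem.Dict String Bool → PySem.Dict String Bool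
  | [], seen => seen
  | m :: rest, seen =>
    let lbl := PySem.Dict.getD ⟨m⟩ "label" ""
    if !(lbl == "") && !(seen.contains lbl) then
      pvLoopB rest (seen.insert lbl (pvSrcIsSimbad m))
    else
      pvLoopB rest seen

def compose_group_label_py_alt (group : List (String × List (List (String × String)))) : Option String :=
  match PySem.Dict.get? ⟨group⟩ "members" with
  | none => none  -- Python raises KeyError here; excluded by Pre_
  | some ms =>
    let seen := pvLoopB ms PySem.Dict.empty
    if seen.items == [] then none
    else
      some (PySem.Str.join "; "
        (PySem.List.sorted seen.keys (fun lbl => !(PySem.Dict.getD seen lbl false)) false))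

-- ===== PRECONDITION & SPEC =====
-- Pre_ excludes exactly the inputs where group["members"] raises KeyError (no "members" key).
def Pre_compose_group_label_py (group : List (String × List (List (String × String)))) : Prop :=
  (PySem.Dict.contains (⟨group⟩ : PySem.Dict String (List (List (String × String)))) "members") = true
instance (group : List (String × List (List (String × String)))) : Decidable (Pre_compose_group_label_py group) := by unfold Pre_compose_group_label_py; infer_instance

def pvWitness_compose_group_label_py : (List (String × List (List (String × String)))) :=
  [("members", [[("label", "Vega"), ("source", "SIMBAD")], [("label", "HD 1"), ("source", "cat")]])]

def Spec_compose_group_label_py (group : List (String × List (List (String × String)))) (out : Option String) : Prop := out = compose_group_label_py_alt group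
instance (group : List (String × List (List (String × String)))) (out : Option String) : Decidable (Spec_compose_group_label_py group out) := by unfold Spec_compose_group_label_py; infer_instance

-- ===== CLAIM (what is proved, stated in full; the proofs are below) =====
def Claim_equal_compose_group_label_py : Prop := ∀ (group : List (String × List (List (String × String)))), Dom_compose_group_label_py group → Pre_compose_group_label_py group → Spec_compose_group_label_py group (compose_group_label_py group)

-- ===== LEMMAS AND PROOFS =====

-- insertBy passes over a prefix it is not "before" any element of
lemma pv_insertBy_append (before : String → String → Bool) (x : String) (as bs : List String)
    (h : ∀ a ∈ as, before x a = false) :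
    PySem.List.insertBy before x (as ++ bs) = as ++ PySem.List.insertBy before x bs := by
  induction as with
  | nil => simp
  | cons a as ih =>
    simp only [List.cons_append, PySem.List.insertBy, h a (by simp)]
    simp [ih (fun a' ha' => h a' (by simp [ha']))]

-- the stable-sort-by-a-Bool-key fold keeps (false-key block ++ true-key block)
lemma pv_fold_insertBy_partition (g : String → Bool) (ks as bs : List String)
    (ha : ∀ a ∈ as, g a = false) (hb : ∀ b ∈ bs, g b = true) :
    ks.foldl (fun acc x => PySem.List.insertBy (fun a b => decide (g a < g b)) x acc) (as ++ bs)
      = (as ++ ks.filter (fun l => !(g l))) ++ (bs ++ ks.filter g) := by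
  induction ks generalizing as bs with
  | nil => simp
  | cons x ks ih =>
    rw [List.foldl_cons]
    by_cases hx : g x = true
    · have h1 : ∀ a ∈ as ++ bs, (fun a b => decide (g a < g b)) x a = false := by
        intro a hamem
        rcases List.mem_append.mp hamem with h | h
        · simp [hx, ha a h]
        · simp [hx, hb a h]
      have hb' : ∀ b ∈ bs ++ [x], g b = true := by
        intro b hbm
        rcases List.mem_append.mp hbm with h | h
        · exact hb b h
        · simp at h; rw [h]; exact hx
      rw [PySem.List.insertBy_of_forall_not_before _ _ _ h1, List.append_assoc as bs [x],
        ih as (bs ++ [x]) ha hb']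
      simp [hx, List.append_assoc]
    · have hx' : g x = false := by simpa using hx
      have h1 : ∀ a ∈ as, (fun a b => decide (g a < g b)) x a = false := by
        intro a ham; simp [hx', ha a ham]
      have h2 : PySem.List.insertBy (fun a b => decide (g a < g b)) x bs = x :: bs := by
        cases bs with
        | nil => rfl
        | cons b bs' =>
          have hbt : g b = true := hb b (by simp)
          simp [PySem.List.insertBy, hx', hbt]
      have ha' : ∀ a ∈ as ++ [x], g a = false := by
        intro a ham
        rcases List.mem_append.mp ham with h | h
        · exact ha a h
        · simp at h; rw [h]; exact hx'
      have hsplit : as ++ x :: bs = (as ++ [x]) ++ bs := by simp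
      rw [pv_insertBy_append _ _ _ _ h1, h2, hsplit, ih (as ++ [x]) bs ha' hb]
      simp [hx', List.append_assoc]

lemma pv_sorted_bool (g : String → Bool) (ks : List String) :
    PySem.List.sorted ks g false = ks.filter (fun l => !(g l)) ++ ks.filter g := by
  have := pv_fold_insertBy_partition g ks [] [] (by simp) (by simp)
  simpa [PySem.List.sorted] using this

-- filtering the keys by the stored flag = projecting the filtered items
lemma pv_keys_filter_flag (d : PySem.Dict String Bool) (hnd : d.keys.Nodup) :
    d.keys.filter (fun l => PySem.Dict.getD d l false)
      = (d.items.filter (fun p => p.2)).map Prod.fst := by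
  have hk : d.keys = d.items.map Prod.fst := rfl
  rw [hk, List.filter_map]
  congr 1
  apply List.filter_congr
  intro p hp
  have : d.get? p.1 = some p.2 := PySem.Dict.get?_of_mem_items d (by cases p; exact hp) hnd
  simp [Function.comp, PySem.Dict.getD, this]

lemma pv_keys_filter_not_flag (d : PySem.Dict String Bool) (hnd : d.keys.Nodup) :
    d.keys.filter (fun l => !(PySem.Dict.getD d l false))
      = (d.items.filter (fun p => !p.2)).map Prod.fst := by
  have hk : d.keys = d.items.map Prod.fst := rfl
  rw [hk, List.filter_map]
  congr 1
  apply List.filter_congr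
  intro p hp
  have : d.get? p.1 = some p.2 := PySem.Dict.get?_of_mem_items d (by cases p; exact hp) hnd
  simp [Function.comp, PySem.Dict.getD, this]

-- the two loops maintain the same partition: A's (sim, oth, seen) is exactly
-- (true-flag items, false-flag items, keys) of B's dict
lemma pv_loop_inv (ms : List (List (String × String))) (d : PySem.Dict String Bool)
    (hnd : d.keys.Nodup) :
    pvLoopA ms ((d.items.filter (fun p => p.2)).map Prod.fst)
      ((d.items.filter (fun p => !p.2)).map Prod.fst) d.keys
      = (((pvLoopB ms d).items.filter (fun p => p.2)).map Prod.fst,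
         ((pvLoopB ms d).items.filter (fun p => !p.2)).map Prod.fst)
    ∧ (pvLoopB ms d).keys.Nodup := by
  induction ms generalizing d with
  | nil => exact ⟨rfl, hnd⟩
  | cons m rest ih =>
    simp only [pvLoopA, pvLoopB]
    set lbl := PySem.Dict.getD (⟨m⟩ : PySem.Dict String String) "label" "" with hlbl
    have hcs : PySem.Set.contains d.keys lbl = d.contains lbl := by
      rw [Bool.eq_iff_iff, PySem.Set.contains_iff, PySem.Dict.contains_iff_mem_keys]
    by_cases hskip : (lbl == "" || PySem.Set.contains d.keys lbl) = true
    · have hskip' : (!(lbl == "") && !(d.contains lbl)) = false := by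
        rcases Bool.or_eq_true_iff.mp hskip with h | h
        · simp [h]
        · rw [hcs] at h; simp [h]
      rw [if_pos hskip, if_neg (by simp [hskip'])]
      exact ih d hnd
    · have hor : (lbl == "") = false ∧ PySem.Set.contains d.keys lbl = false := by
        constructor
        · cases h : (lbl == "") with
          | false => rfl
          | true => exact absurd (Bool.or_eq_true_iff.mpr (Or.inl h)) hskip
        · cases h : PySem.Set.contains d.keys lbl with
          | false => rfl
          | true => exact absurd (Bool.or_eq_true_iff.mpr (Or.inr h)) hskip
      have hne : (lbl == "") = false := hor.1
      have hnc : d.contains lbl = false := by rw [← hcs]; exact hor.2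
      have hBcond : (!(lbl == "") && !(d.contains lbl)) = true := by rw [hne, hnc]; rfl
      rw [if_neg hskip, if_pos hBcond]
      have hadd : PySem.Set.add d.keys lbl = d.keys ++ [lbl] := by
        simp only [PySem.Set.add]
        rw [if_neg (by rw [hcs, hnc]; simp)]
      have hitems := PySem.Dict.items_insert_of_not_contains d (pvSrcIsSimbad m) hnc
      have hkeys := PySem.Dict.keys_insert_of_not_contains d (pvSrcIsSimbad m) hnc
      have hnd' : (d.insert lbl (pvSrcIsSimbad m)).keys.Nodup :=
        PySem.Dict.nodup_keys_insert d lbl (pvSrcIsSimbad m) hnd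
      by_cases hsb : pvSrcIsSimbad m = true
      · rw [if_pos hsb, hadd, ← hkeys]
        have e1 : (d.items.filter (fun p => p.2)).map Prod.fst ++ [lbl]
            = ((d.insert lbl (pvSrcIsSimbad m)).items.filter (fun p => p.2)).map Prod.fst := by
          rw [hitems, List.filter_append, List.map_append]; simp [hsb]
        have e2 : (d.items.filter (fun p => !p.2)).map Prod.fst
            = ((d.insert lbl (pvSrcIsSimbad m)).items.filter (fun p => !p.2)).map Prod.fst := by
          rw [hitems, List.filter_append, List.map_append]; simp [hsb]
        rw [e1, e2]
        exact ih _ hnd'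
      · have hsb' : pvSrcIsSimbad m = false := by simpa using hsb
        rw [if_neg hsb, hadd, ← hkeys]
        have e1 : (d.items.filter (fun p => p.2)).map Prod.fst
            = ((d.insert lbl (pvSrcIsSimbad m)).items.filter (fun p => p.2)).map Prod.fst := by
          rw [hitems, List.filter_append, List.map_append]; simp [hsb']
        have e2 : (d.items.filter (fun p => !p.2)).map Prod.fst ++ [lbl]
            = ((d.insert lbl (pvSrcIsSimbad m)).items.filter (fun p => !p.2)).map Prod.fst := by
          rw [hitems, List.filter_append, List.map_append]; simp [hsb']
        rw [e1, e2]
        exact ih _ hnd'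

lemma pv_filter_lengths (l : List (String × Bool)) :
    (l.filter (fun p => p.2)).length + (l.filter (fun p => !p.2)).length = l.length := by
  induction l with
  | nil => rfl
  | cons p t ih =>
    by_cases h : p.2 = true
    · simp [h]; omega
    · have h' : p.2 = false := by simpa using h
      simp [h']; omega

-- ===== VERDICT (by name: the statement is the Claim_ definition above) =====
theorem compose_group_label_py_spec : Claim_equal_compose_group_label_py := by
  intro group _ _
  unfold Spec_compose_group_label_py compose_group_label_py compose_group_label_py_alt
  cases hms : PySem.Dict.get? (⟨group⟩ : PySem.Dict String (List (List (String × String)))) "members" with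
  | none => rfl
  | some ms =>
    simp only []
    have hinv := pv_loop_inv ms PySem.Dict.empty (by simp [PySem.Dict.keys, PySem.Dict.empty])
    have hstart : pvLoopA ms [] [] PySem.Set.empty
        = (((pvLoopB ms PySem.Dict.empty).items.filter (fun p => p.2)).map Prod.fst,
           ((pvLoopB ms PySem.Dict.empty).items.filter (fun p => !p.2)).map Prod.fst) := by
      have := hinv.1
      simpa [PySem.Dict.empty, PySem.Dict.keys, PySem.Set.empty] using this
    set dfin := pvLoopB ms PySem.Dict.empty with hdfin
    have hnd : dfin.keys.Nodup := hinv.2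
    rw [hstart]
    have hsort : PySem.List.sorted dfin.keys (fun lbl => !(PySem.Dict.getD dfin lbl false)) false
        = (dfin.items.filter (fun p => p.2)).map Prod.fst
          ++ (dfin.items.filter (fun p => !p.2)).map Prod.fst := by
      rw [pv_sorted_bool]
      rw [← pv_keys_filter_flag dfin hnd, ← pv_keys_filter_not_flag dfin hnd]
      congr 1
      apply List.filter_congr
      intro l _
      simp
    have hlen : ((dfin.items.filter (fun p => p.2)).map Prod.fst
        ++ (dfin.items.filter (fun p => !p.2)).map Prod.fst).length = dfin.items.length := by
      simp [pv_filter_lengths]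
    by_cases hemp : dfin.items = []
    · simp [hemp]
    · have hne : ((dfin.items.filter (fun p => p.2)).map Prod.fst
          ++ (dfin.items.filter (fun p => !p.2)).map Prod.fst) ≠ [] := by
        intro h
        rw [h] at hlen
        exact hemp (List.eq_nil_of_length_eq_zero hlen.symm)
      rw [if_neg (by simpa using hne), if_neg (by simpa using hemp), hsort]
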